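-- pv_equiv track=rewrite | github.com/zhangkunzk/EMCRL_pytorch | data/data_preprocessing.py | simple_clean_sentence
-- ===== SOURCE A (Python) =====
-- def simple_clean_sentence(sent):
--     punctuation = ['.', ',', '!', '/', ':', ';',
--                    '+', '-', '*', '?', '~', '|',
--                    '[', ']', '{', '}', '(', ')',
--                    '_', '=', '%', '&', '$', '#',
--                    '"', '`', '^']
--
--     sent = sent.replace('\n', ' ').replace('\\n', ' ').replace('\\', ' ')
--     for p in punctuation:
--         sent = sent.replace(p, ' ' + p + ' ')
--     # sent = re.sub(r'\d+\.?\d*', ' numbernumbernumbernumbernumber ', sent)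
--     return sent.lower()
-- ===== SOURCE B (Python) =====
-- def simple_clean_sentence(sent):
--     table = {p: ' ' + p + ' ' for p in '.,!/:;+-*?~|[]{}()_=%&$#"`^'}
--     sent = sent.replace('\n', ' ').replace('\\n', ' ').replace('\\', ' ')
--     return ''.join(table.get(c, c) for c in sent).lower()
-- ===== Notes on version B (the rewrite author's own statement) =====
-- stated objective: simpler
-- what changed: A's 27 sequential full-string .replace passes are replaced by a translation table (dict from each punctuation mark to its space-padded form) built once, applied in a single map-and-join over the characters; the three leading newline/backslash replaces are kept verbatim.
import Mathlib
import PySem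

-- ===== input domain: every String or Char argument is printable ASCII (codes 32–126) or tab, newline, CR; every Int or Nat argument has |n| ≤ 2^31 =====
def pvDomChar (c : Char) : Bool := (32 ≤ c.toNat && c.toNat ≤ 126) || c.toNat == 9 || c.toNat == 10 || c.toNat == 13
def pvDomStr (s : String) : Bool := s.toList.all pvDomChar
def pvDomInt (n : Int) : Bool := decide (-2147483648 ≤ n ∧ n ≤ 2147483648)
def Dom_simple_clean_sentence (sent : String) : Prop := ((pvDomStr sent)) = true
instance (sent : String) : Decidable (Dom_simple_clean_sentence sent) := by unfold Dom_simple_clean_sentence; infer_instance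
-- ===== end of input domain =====

-- B replaces A's 27 sequential full-string punctuation .replace passes with a translation
-- table (dict: mark ↦ space-padded mark) applied in one map-and-join over the characters.

-- ===== PORT A =====
-- A's punctuation list, in A's order
def pvPunctList : List Char :=
  ['.', ',', '!', '/', ':', ';',
   '+', '-', '*', '?', '~', '|',
   '[', ']', '{', '}', '(', ')',
   '_', '=', '%', '&', '$', '#',
   '"', '`', '^']

def simple_clean_sentence (sent : String) : String :=
  let s1 := PySem.Str.replace (PySem.Str.replace (PySem.Str.replace sent "\n" " ") "\\n" " ") "\\" " "
  let s2 := pvPunctList.foldl (fun s p => PySem.Str.replace s (String.ofList [p]) (String.ofList [' ', p, ' '])) s1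
  PySem.Str.lower s2

-- ===== PORT B =====
-- B's punctuation marks, as the string literal Source B iterates over
def pvPunctStr : String := ".,!/:;+-*?~|[]{}()_=%&$#\"`^"

-- the dict comprehension {p: ' ' + p + ' ' for p in pvPunctStr}
def pvPunctTable : PySem.Dict Char String :=
  pvPunctStr.toList.foldl (fun d p => PySem.Dict.insert d p (String.ofList [' ', p, ' '])) PySem.Dict.empty

def simple_clean_sentence_alt (sent : String) : String :=
  let s1 := PySem.Str.replace (PySem.Str.replace (PySem.Str.replace sent "\n" " ") "\\n" " ") "\\" " "
  -- ''.join(table.get(c, c) for c in sent).lower()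
  PySem.Str.lower (PySem.Str.join "" (s1.toList.map (fun c => PySem.Dict.getD pvPunctTable c (String.ofList [c]))))

-- ===== PRECONDITION & SPEC =====
def Spec_simple_clean_sentence (sent : String) (out : String) : Prop := out = simple_clean_sentence_alt sent
instance (sent : String) (out : String) : Decidable (Spec_simple_clean_sentence sent out) := by unfold Spec_simple_clean_sentence; infer_instance

-- ===== CLAIM (what is proved, stated in full; the proofs are below) =====
def Claim_equal_simple_clean_sentence : Prop := ∀ (sent : String), Dom_simple_clean_sentence sent → Spec_simple_clean_sentence sent (simple_clean_sentence sent)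

-- ===== LEMMAS AND PROOFS =====

-- single-character replace is a flatMap over the characters
theorem pv_go_single (p : Char) (new : List Char) (fuel : Nat) :
    ∀ (l acc : List Char), l.length ≤ fuel →
      PySem.Chars.replace.go [p] new fuel l acc
        = acc.reverse ++ l.flatMap (fun c => if c = p then new else [c]) := by
  induction fuel with
  | zero =>
    intro l acc h
    have : l = [] := List.length_eq_zero_iff.mp (Nat.le_zero.mp h)
    subst this
    simp [PySem.Chars.replace.go]
  | succ n ih =>
    intro l acc h
    cases l with
    | nil => simp [PySem.Chars.replace.go]
    | cons c t =>
      have ht : t.length ≤ n := by simp at h; omega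
      by_cases hc : c = p
      · subst hc
        have hpre : List.isPrefixOf [c] (c :: t) = true := by
          simp [List.isPrefixOf]
        simp only [PySem.Chars.replace.go, hpre, if_pos, List.length_cons, List.length_nil,
          List.drop_succ_cons, List.drop_zero]
        rw [ih t (new.reverse ++ acc) ht]
        simp
      · have hpre : List.isPrefixOf [p] (c :: t) = false := by
          simp [List.isPrefixOf]; intro hcp; exact absurd hcp.symm hc
        simp only [PySem.Chars.replace.go, hpre, Bool.false_eq_true, if_false]
        rw [ih t (c :: acc) ht]
        simp [hc]

theorem pv_replace_single (s : List Char) (p : Char) (new : List Char) :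
    PySem.Chars.replace s [p] new = s.flatMap (fun c => if c = p then new else [c]) := by
  simp only [PySem.Chars.replace, List.isEmpty_cons, Bool.false_eq_true, if_false]
  exact pv_go_single p new s.length s [] le_rfl

-- a sequence of single-character space-padding replaces over distinct non-space marks
-- collapses to one flatMap with membership in the list of marks
theorem pv_fold_flatMap (ps : List Char) (hnd : ps.Nodup) (hsp : ' ' ∉ ps) :
    ∀ (s : List Char),
      ps.foldl (fun t q => t.flatMap (fun c => if c = q then [' ', q, ' '] else [c])) s
        = s.flatMap (fun c => if c ∈ ps then [' ', c, ' '] else [c]) := by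
  induction ps with
  | nil => intro s; simp
  | cons p ps ih =>
    intro s
    have hnd' : ps.Nodup := hnd.of_cons
    have hp : p ∉ ps := by simp [List.nodup_cons] at hnd; exact hnd.1
    have hsp' : ' ' ∉ ps := fun h => hsp (List.mem_cons_of_mem _ h)
    simp only [List.foldl_cons]
    rw [ih hnd' hsp', List.flatMap_assoc]
    apply List.flatMap_congr
    intro c _
    by_cases hc : c = p
    · subst hc; simp [hp, hsp']
    · simp [hc]

-- the String-level foldl of A's punctuation loop, moved to the character lists
theorem pv_str_fold_replace (ps : List Char) (s : String) :
    (ps.foldl (fun t q => PySem.Str.replace t (String.ofList [q]) (String.ofList [' ', q, ' '])) s).toList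
      = ps.foldl (fun t q => t.flatMap (fun c => if c = q then [' ', q, ' '] else [c])) s.toList := by
  induction ps generalizing s with
  | nil => simp
  | cons p ps ih =>
    simp only [List.foldl_cons]
    rw [ih]
    congr 1
    rw [PySem.Str.toList_replace, String.toList_ofList, String.toList_ofList, pv_replace_single]

-- Nodup/space facts about the mark list
set_option maxRecDepth 4096 in
theorem pv_nodup : pvPunctList.Nodup := by decide

set_option maxRecDepth 4096 in
theorem pv_space_not_mem : ' ' ∉ pvPunctList := by decide

-- B's mark string holds exactly A's marks
set_option maxRecDepth 4096 in
theorem pv_punctStr_toList : pvPunctStr.toList = pvPunctList := by decide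

-- looking up the comprehension-built table is membership in the mark list
theorem pv_table_fold_getD (ps : List Char) :
    ∀ (d0 : PySem.Dict Char String) (c : Char) (dflt : String),
      PySem.Dict.getD (ps.foldl (fun d p => PySem.Dict.insert d p (String.ofList [' ', p, ' '])) d0) c dflt
        = if c ∈ ps then String.ofList [' ', c, ' '] else PySem.Dict.getD d0 c dflt := by
  induction ps with
  | nil => intro d0 c dflt; simp
  | cons p t ih =>
    intro d0 c dflt
    simp only [List.foldl_cons]
    rw [ih]
    by_cases hct : c ∈ t
    · simp [hct]
    · by_cases hcp : c = p
      · subst hcp; simp [hct]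
      · simp [hct, hcp, PySem.Dict.getD_insert]

theorem pv_table_getD (c : Char) (dflt : String) :
    PySem.Dict.getD pvPunctTable c dflt
      = if c ∈ pvPunctList then String.ofList [' ', c, ' '] else dflt := by
  rw [pvPunctTable, pv_table_fold_getD, pv_punctStr_toList]
  by_cases h : c ∈ pvPunctList <;> simp [h, PySem.Dict.getD_empty]

-- ''.join(parts) flattens the character lists
theorem pv_join_toList (parts : List String) :
    (PySem.Str.join "" parts).toList = parts.flatMap String.toList := by
  have h : ∀ (l : List (List Char)), (List.intersperse ([] : List Char) l).flatten = l.flatten := by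
    intro l
    induction l with
    | nil => rfl
    | cons a t ih => cases t with
      | nil => rfl
      | cons b u => simp_all [List.intersperse]
  simp [PySem.Str.toList_join, PySem.Chars.join, List.intercalate, h, List.flatMap_def]

-- A's punctuation fold equals B's joined translation, as Strings
theorem pv_main (s1 : String) :
    pvPunctList.foldl (fun s p => PySem.Str.replace s (String.ofList [p]) (String.ofList [' ', p, ' '])) s1
      = PySem.Str.join "" (s1.toList.map (fun c => PySem.Dict.getD pvPunctTable c (String.ofList [c]))) := by
  apply String.toList_injective
  rw [pv_join_toList, pv_str_fold_replace, pv_fold_flatMap pvPunctList pv_nodup pv_space_not_mem,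
    List.flatMap_def, List.flatMap_def, List.map_map]
  congr 1
  apply List.map_congr_left
  intro c _
  rw [Function.comp_apply, pv_table_getD]
  by_cases h : c ∈ pvPunctList <;> simp [h]

-- ===== VERDICT (by name: the statement is the Claim_ definition above) =====
theorem simple_clean_sentence_spec : Claim_equal_simple_clean_sentence := by
  intro sent _
  show simple_clean_sentence sent = simple_clean_sentence_alt sent
  simp only [simple_clean_sentence, simple_clean_sentence_alt]
  rw [pv_main]
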